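-- pv_equiv track=rewrite | github.com/42433422/ai-excel-helper | backend/routers/xcagi_compat.py | _detect_effective_col_count
-- ===== SOURCE A (Python) =====
-- def _detect_effective_col_count(values_rows: list[list[str]], fallback_cols: int) -> int:
--     """检测有效列数：取所有行最后一个非空单元格位置的最大值。"""
--     max_used = 0
--     for row in values_rows:
--         last_non_empty = 0
--         for idx, cell in enumerate(row, start=1):
--             if str(cell or "").strip():
--                 last_non_empty = idx
--         if last_non_empty > max_used:
--             max_used = last_non_empty
--     if max_used > 0:
--         return max_used
--     return max(1, int(fallback_cols or 1))
-- ===== SOURCE B (Python) =====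
-- def _detect_effective_col_count(values_rows: list[list[str]], fallback_cols: int) -> int:
--     """Reverse early-break scan: each row's count is len(row) minus the reversed
--     offset of the first non-empty cell from the end (0 if the row is all empty)."""
--     best = 0
--     for row in values_rows:
--         count = 0
--         for j, cell in enumerate(reversed(row)):
--             if str(cell or "").strip():
--                 count = len(row) - j
--                 break
--         if count > best:
--             best = count
--     if best > 0:
--         return best
--     return max(1, int(fallback_cols or 1))
-- ===== Notes on version B (the rewrite author's own statement) =====
-- stated objective: idiomatic
-- what changed: Each row is scanned backward with an early break at the first non-empty cell (count = len(row) - reversed offset) instead of scanning the whole row forward and overwriting the last non-empty index.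
import Mathlib
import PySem

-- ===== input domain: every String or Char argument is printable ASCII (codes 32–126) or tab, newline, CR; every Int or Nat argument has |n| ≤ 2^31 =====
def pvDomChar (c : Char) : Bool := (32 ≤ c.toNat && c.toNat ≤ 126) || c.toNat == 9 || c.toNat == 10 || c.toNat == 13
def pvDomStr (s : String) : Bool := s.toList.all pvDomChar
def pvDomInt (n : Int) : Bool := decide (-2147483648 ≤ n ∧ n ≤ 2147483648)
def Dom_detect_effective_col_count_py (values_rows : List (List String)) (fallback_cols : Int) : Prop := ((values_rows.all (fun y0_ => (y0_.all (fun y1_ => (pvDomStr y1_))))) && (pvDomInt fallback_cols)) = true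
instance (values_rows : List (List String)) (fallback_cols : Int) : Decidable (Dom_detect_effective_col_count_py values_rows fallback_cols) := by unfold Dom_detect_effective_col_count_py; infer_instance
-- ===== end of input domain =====

-- B scans each row backward with an early break at the first non-empty cell instead of
-- A's full forward overwrite scan; objective: idiomatic (same worst-case cost).

-- ===== PORT A =====
-- forward scan: overwrite last_non_empty with the 1-based index of every non-empty cell
def detect_effective_col_count_py (values_rows : List (List String)) (fallback_cols : Int) : Int :=
  let max_used := values_rows.foldl (fun max_used row =>
    let last_non_empty : Int := (PySem.List.enumerate row 1).foldl
      (fun last_non_empty p =>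
        if PySem.Str.strip (if p.2 = "" then "" else p.2) ≠ "" then p.1 else last_non_empty)
      0
    if last_non_empty > max_used then last_non_empty else max_used) 0
  if max_used > 0 then max_used
  else max 1 (if fallback_cols = 0 then 1 else fallback_cols)

-- ===== PORT B =====
-- reverse scan with early exit: j is the offset in reversed(row), count = len(row) - j
def pvBRowAux (n : Nat) : List String → Nat → Int
  | [], _ => 0
  | c :: rest, j =>
    if PySem.Str.strip (if c = "" then "" else c) ≠ "" then ((n - j : Nat) : Int)
    else pvBRowAux n rest (j + 1)

def detect_effective_col_count_py_alt (values_rows : List (List String)) (fallback_cols : Int) : Int :=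
  let best := values_rows.foldl (fun best row =>
    let count := pvBRowAux row.length row.reverse 0
    if count > best then count else best) 0
  if best > 0 then best
  else max 1 (if fallback_cols = 0 then 1 else fallback_cols)

-- ===== PRECONDITION & SPEC =====
def Spec_detect_effective_col_count_py (values_rows : List (List String)) (fallback_cols : Int) (out : Int) : Prop := out = detect_effective_col_count_py_alt values_rows fallback_cols
instance (values_rows : List (List String)) (fallback_cols : Int) (out : Int) : Decidable (Spec_detect_effective_col_count_py values_rows fallback_cols out) := by unfold Spec_detect_effective_col_count_py; infer_instance

-- ===== CLAIM (what is proved, stated in full; the proofs are below) =====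
def Claim_equal_detect_effective_col_count_py : Prop := ∀ (values_rows : List (List String)) (fallback_cols : Int), Dom_detect_effective_col_count_py values_rows fallback_cols → Spec_detect_effective_col_count_py values_rows fallback_cols (detect_effective_col_count_py values_rows fallback_cols)

-- ===== LEMMAS AND PROOFS =====

-- per-row equality: B's reverse early-exit scan equals A's forward overwrite scan
theorem pv_row_eq : ∀ (xs : List String) (n j : Nat), n = xs.length + j →
    pvBRowAux n xs.reverse j =
      (PySem.List.enumerate xs 1).foldl
        (fun acc p =>
          if PySem.Str.strip (if p.2 = "" then "" else p.2) ≠ "" then p.1 else acc) 0 := by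
  intro xs
  induction xs using List.reverseRecOn with
  | nil =>
      intro n j _
      simp [pvBRowAux, PySem.List.enumerate_nil]
  | append_singleton ys x ih =>
      intro n j hn
      rw [List.reverse_append]
      simp only [List.reverse_singleton, List.singleton_append, pvBRowAux,
        PySem.List.enumerate_append, List.foldl_append, PySem.List.enumerate_cons,
        PySem.List.enumerate_nil, List.foldl_cons, List.foldl_nil]
      have hn' : n = ys.length + 1 + j := by simp [List.length_append] at hn; omega
      split_ifs <;>
        first
          | exact ih n (j + 1) (by omega)
          | (have hlen : n - j = ys.length + 1 := by omega
             rw [hlen]; push_cast; ring)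

-- the two outer folds agree for every accumulator
theorem pv_fold_eq : ∀ (rows : List (List String)) (acc : Int),
    rows.foldl (fun max_used row =>
      let last_non_empty : Int := (PySem.List.enumerate row 1).foldl
        (fun last_non_empty p =>
          if PySem.Str.strip (if p.2 = "" then "" else p.2) ≠ "" then p.1 else last_non_empty)
        0
      if last_non_empty > max_used then last_non_empty else max_used) acc
    = rows.foldl (fun best row =>
      let count := pvBRowAux row.length row.reverse 0
      if count > best then count else best) acc := by
  intro rows
  induction rows with
  | nil => intro acc; rfl
  | cons row rest ih =>
      intro acc
      simp only [List.foldl_cons]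
      rw [pv_row_eq row row.length 0 (by omega)]
      exact ih _

-- ===== VERDICT (by name: the statement is the Claim_ definition above) =====
theorem detect_effective_col_count_py_spec : Claim_equal_detect_effective_col_count_py := by
  intro values_rows fallback_cols _
  unfold Spec_detect_effective_col_count_py detect_effective_col_count_py
    detect_effective_col_count_py_alt
  rw [pv_fold_eq]
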